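-- pv_equiv track=rewrite | github.com/jackdmarquez/flowcept | src/flowcept/report/renderers/provenance_card_markdown.py | _filter_all_empty_columns
-- ===== SOURCE A (Python) =====
-- from typing import Any, Dict, Iterable, List, Optional, Tuple
--
-- def _is_empty_metric(value: Any) -> bool:
--     """Return True when a rendered metric is effectively empty."""
--     if value is None:
--         return True
--     if isinstance(value, str):
--         return value.strip() in {"-", "unknown", "", "- / -", "-/-"}
--     return False
--
-- def _filter_all_empty_columns(
--     headers: List[str],
--     rows: List[List[Any]],
--     keep_indices: List[int],
-- ) -> Tuple[List[str], List[List[Any]]]: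
--     """Drop columns whose values are empty across all rows."""
--     if not rows:
--         return headers, rows
--     keep = set(keep_indices)
--     for col_ix in range(len(headers)):
--         if col_ix in keep:
--             continue
--         if any(not _is_empty_metric(row[col_ix]) for row in rows):
--             keep.add(col_ix)
--     kept = [ix for ix in range(len(headers)) if ix in keep]
--     return [headers[ix] for ix in kept], [[row[ix] for ix in kept] for row in rows]
-- ===== SOURCE B (Python) =====
-- from typing import Any, List, Tuple
--
--
-- def _is_empty_metric(value: Any) -> bool:
--     """Return True when a rendered metric is effectively empty."""
--     if value is None:
--         return True
--     if isinstance(value, str):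
--         return value.strip() in {"-", "unknown", "", "- / -", "-/-"}
--     return False
--
--
-- def _filter_all_empty_columns(
--     headers: List[str],
--     rows: List[List[Any]],
--     keep_indices: List[int],
-- ) -> Tuple[List[str], List[List[Any]]]:
--     """Drop columns whose values are empty across all rows.
--
--     Dual/elimination algorithm: start with the set of candidate columns to DROP
--     (everything not protected by keep_indices) and walk the rows once, removing
--     a candidate as soon as a row shows content there; stop early once no
--     candidate survives. Kept columns are the complement.
--     """
--     if not rows:
--         return headers, rows
--     forced = set(keep_indices)
--     candidates = {i for i in range(len(headers)) if i not in forced}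
--     for row in rows:
--         if not candidates:
--             break
--         candidates = {i for i in candidates if _is_empty_metric(row[i])}
--     kept = [i for i in range(len(headers)) if i not in candidates]
--     return [headers[i] for i in kept], [[row[i] for i in kept] for row in rows]
-- ===== Notes on version B (the rewrite author's own statement) =====
-- stated objective: alternative
-- what changed: A grows a keep-set by scanning column-by-column with an any() over rows; B runs the dual elimination: it starts from the set of droppable candidate columns and walks the rows once, deleting a candidate the moment a row shows content there (with early exit when none survive), then takes the complement.
import Mathlib
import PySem

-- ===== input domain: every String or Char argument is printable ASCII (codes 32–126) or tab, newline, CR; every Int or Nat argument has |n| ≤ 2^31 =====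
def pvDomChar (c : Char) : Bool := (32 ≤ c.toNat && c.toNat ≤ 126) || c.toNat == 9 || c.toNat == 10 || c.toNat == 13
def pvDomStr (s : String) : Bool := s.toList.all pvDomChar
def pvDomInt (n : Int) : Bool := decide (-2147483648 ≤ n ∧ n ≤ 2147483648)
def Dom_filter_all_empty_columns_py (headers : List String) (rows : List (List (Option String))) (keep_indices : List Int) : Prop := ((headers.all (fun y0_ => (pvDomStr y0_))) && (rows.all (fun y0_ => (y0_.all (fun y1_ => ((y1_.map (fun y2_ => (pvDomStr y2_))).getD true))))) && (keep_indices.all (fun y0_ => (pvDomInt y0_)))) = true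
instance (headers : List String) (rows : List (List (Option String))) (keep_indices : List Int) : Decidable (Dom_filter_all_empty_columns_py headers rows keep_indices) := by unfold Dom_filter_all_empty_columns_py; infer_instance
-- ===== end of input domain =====

-- B replaces A's column-by-column keep-set growth by the dual elimination: a row-major pass
-- that deletes drop-candidates as soon as a row shows content (objective: alternative algorithm).

-- ===== PORT A =====
-- shared module helper _is_empty_metric (cells are Optional[str], so the isinstance branch is the `some` case)
def pvIsEmptyMetric (v : Option String) : Bool :=
  match v with
  | none => true
  | some s =>
    let t := PySem.Str.strip s
    t == "-" || t == "unknown" || t == "" || t == "- / -" || t == "-/-"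

-- row[ix] is ported as (pyGet? row ix).join; Pre_ guarantees the index is in range (none = IndexError never reached)
def filter_all_empty_columns_py (headers : List String) (rows : List (List (Option String))) (keep_indices : List Int) : List String × List (List (Option String)) :=
  if rows = [] then (headers, rows) else
  let keep := (List.range headers.length).foldl
    (fun (k : PySem.Set Int) (col_ix : Nat) =>
      if PySem.Set.contains k (col_ix : Int) then k
      else if rows.any (fun row => !pvIsEmptyMetric ((PySem.List.pyGet? row (col_ix : Int)).join)) then
        PySem.Set.add k (col_ix : Int)
      else k)
    (PySem.Set.ofList keep_indices)
  let kept := (List.range headers.length).filter (fun (ix : Nat) => PySem.Set.contains keep (ix : Int))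
  (kept.map (fun (ix : Nat) => (PySem.List.pyGet? headers (ix : Int)).getD ""),
   rows.map (fun row => kept.map (fun (ix : Nat) => (PySem.List.pyGet? row (ix : Int)).join)))

-- ===== PORT B =====
-- the row loop with its early `break`: shrink the candidate set row by row, stop when empty
def pvElim (rows : List (List (Option String))) (cand : PySem.Set Int) : PySem.Set Int :=
  match rows with
  | [] => cand
  | row :: rest =>
    if cand = [] then cand
    else pvElim rest (cand.filter (fun i => pvIsEmptyMetric ((PySem.List.pyGet? row i).join)))

def filter_all_empty_columns_py_alt (headers : List String) (rows : List (List (Option String))) (keep_indices : List Int) : List String × List (List (Option String)) :=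
  if rows = [] then (headers, rows) else
  let forced := PySem.Set.ofList keep_indices
  -- {i for i in range(len(headers)) if i not in forced}: distinct by construction, so a valid Set
  let candidates0 : PySem.Set Int :=
    ((List.range headers.length).filter (fun (i : Nat) => !PySem.Set.contains forced (i : Int))).map (fun (i : Nat) => (i : Int))
  let cand := pvElim rows candidates0
  let kept := (List.range headers.length).filter (fun (ix : Nat) => !PySem.Set.contains cand (ix : Int))
  (kept.map (fun (ix : Nat) => (PySem.List.pyGet? headers (ix : Int)).getD ""),
   rows.map (fun row => kept.map (fun (ix : Nat) => (PySem.List.pyGet? row (ix : Int)).join)))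

-- ===== PRECONDITION & SPEC =====
-- Pre_ excludes exactly the inputs where the Python raises IndexError: a nonempty rows list
-- containing a row shorter than headers (row[col_ix] is then reached in the scan or projection).
def Pre_filter_all_empty_columns_py (headers : List String) (rows : List (List (Option String))) (keep_indices : List Int) : Prop :=
  rows = [] ∨ ∀ r ∈ rows, headers.length ≤ r.length
instance (headers : List String) (rows : List (List (Option String))) (keep_indices : List Int) : Decidable (Pre_filter_all_empty_columns_py headers rows keep_indices) := by unfold Pre_filter_all_empty_columns_py; infer_instance
def pvWitness_filter_all_empty_columns_py : List String × List (List (Option String)) × List Int :=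
  (["a", "b"], [[some "x", none], [none, some "-"]], [1])

def Spec_filter_all_empty_columns_py (headers : List String) (rows : List (List (Option String))) (keep_indices : List Int) (out : List String × List (List (Option String))) : Prop := out = filter_all_empty_columns_py_alt headers rows keep_indices
instance (headers : List String) (rows : List (List (Option String))) (keep_indices : List Int) (out : List String × List (List (Option String))) : Decidable (Spec_filter_all_empty_columns_py headers rows keep_indices out) := by unfold Spec_filter_all_empty_columns_py; infer_instance

-- ===== CLAIM (what is proved, stated in full; the proofs are below) =====
def Claim_equal_filter_all_empty_columns_py : Prop := ∀ (headers : List String) (rows : List (List (Option String))) (keep_indices : List Int), Dom_filter_all_empty_columns_py headers rows keep_indices → Pre_filter_all_empty_columns_py headers rows keep_indices → Spec_filter_all_empty_columns_py headers rows keep_indices (filter_all_empty_columns_py headers rows keep_indices)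

-- ===== LEMMAS AND PROOFS =====

-- membership in A's final keep set: initial elements plus every index of the scan whose column test fires
theorem mem_foldl_keepstep (c : Nat → Bool) (l : List Nat) (s : PySem.Set Int) (x : Int) :
    (x ∈ l.foldl
      (fun (k : PySem.Set Int) (i : Nat) => if PySem.Set.contains k (i : Int) then k
                  else if c i then PySem.Set.add k (i : Int) else k) s)
    ↔ (x ∈ s ∨ ∃ i ∈ l, c i = true ∧ x = (i : Int)) := by
  induction l generalizing s with
  | nil => simp
  | cons a l ih =>
    simp only [List.foldl_cons]
    by_cases h1 : PySem.Set.contains s (a : Int) = true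
    · rw [if_pos h1, ih]
      rw [PySem.Set.contains_iff] at h1
      constructor
      · rintro (h | ⟨i, hi, hc, rfl⟩)
        · exact Or.inl h
        · exact Or.inr ⟨i, List.mem_cons_of_mem _ hi, hc, rfl⟩
      · rintro (h | ⟨i, hi, hc, rfl⟩)
        · exact Or.inl h
        · rcases List.mem_cons.mp hi with rfl | hi
          · exact Or.inl h1
          · exact Or.inr ⟨i, hi, hc, rfl⟩
    · rw [if_neg h1]
      by_cases h2 : c a = true
      · rw [if_pos h2, ih]
        simp only [PySem.Set.mem_add, List.mem_cons]
        constructor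
        · rintro ((h | rfl) | ⟨i, hi, hc, rfl⟩)
          · exact Or.inl h
          · exact Or.inr ⟨a, Or.inl rfl, h2, rfl⟩
          · exact Or.inr ⟨i, Or.inr hi, hc, rfl⟩
        · rintro (h | ⟨i, rfl | hi, hc, rfl⟩)
          · exact Or.inl (Or.inl h)
          · exact Or.inl (Or.inr rfl)
          · exact Or.inr ⟨i, hi, hc, rfl⟩
      · rw [if_neg h2, ih]
        constructor
        · rintro (h | ⟨i, hi, hc, rfl⟩)
          · exact Or.inl h
          · exact Or.inr ⟨i, List.mem_cons_of_mem _ hi, hc, rfl⟩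
        · rintro (h | ⟨i, hi, hc, rfl⟩)
          · exact Or.inl h
          · rcases List.mem_cons.mp hi with rfl | hi
            · exact absurd hc h2
            · exact Or.inr ⟨i, hi, hc, rfl⟩

-- a candidate survives B's elimination pass iff it started out and every row is empty there
theorem mem_pvElim (rows : List (List (Option String))) (cand : PySem.Set Int) (x : Int) :
    x ∈ pvElim rows cand
      ↔ (x ∈ cand ∧ ∀ row ∈ rows, pvIsEmptyMetric ((PySem.List.pyGet? row x).join) = true) := by
  induction rows generalizing cand with
  | nil => simp [pvElim]
  | cons row rest ih =>
    rw [pvElim]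
    by_cases h : cand = []
    · subst h; simp
    · rw [if_neg h, ih]
      simp only [List.mem_filter, List.mem_cons]
      constructor
      · rintro ⟨⟨hx, he⟩, hall⟩
        refine ⟨hx, fun r hr => ?_⟩
        rcases hr with h' | h'
        · subst h'; exact he
        · exact hall r h'
      · rintro ⟨hx, hall⟩
        exact ⟨⟨hx, hall row (Or.inl rfl)⟩, fun r hr => hall r (Or.inr hr)⟩

-- ===== VERDICT (by name: the statement is the Claim_ definition above) =====
theorem filter_all_empty_columns_py_spec : Claim_equal_filter_all_empty_columns_py := by
  intro headers rows keep_indices _ _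
  unfold Spec_filter_all_empty_columns_py
  unfold filter_all_empty_columns_py filter_all_empty_columns_py_alt
  by_cases hr : rows = []
  · simp [hr]
  · rw [if_neg hr, if_neg hr]
    set n := headers.length with hn
    set c : Nat → Bool := fun ix =>
      rows.any (fun row => !pvIsEmptyMetric ((PySem.List.pyGet? row (ix : Int)).join)) with hc
    have hkept :
        (List.range n).filter (fun (ix : Nat) =>
          PySem.Set.contains ((List.range n).foldl
            (fun (k : PySem.Set Int) (col_ix : Nat) => if PySem.Set.contains k (col_ix : Int) then k
              else if rows.any (fun row => !pvIsEmptyMetric ((PySem.List.pyGet? row (col_ix : Int)).join)) then PySem.Set.add k (col_ix : Int) else k)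
            (PySem.Set.ofList keep_indices)) (ix : Int))
        = (List.range n).filter (fun (ix : Nat) =>
            !PySem.Set.contains (pvElim rows
              (((List.range n).filter (fun (i : Nat) => !PySem.Set.contains (PySem.Set.ofList keep_indices) (i : Int))).map (fun (i : Nat) => (i : Int)))) (ix : Int)) := by
      apply List.filter_congr
      intro ix hix
      rw [List.mem_range] at hix
      rw [Bool.eq_iff_iff, PySem.Set.contains_iff, mem_foldl_keepstep,
        Bool.not_eq_true', ← Bool.not_eq_true, PySem.Set.contains_iff, mem_pvElim]
      have hcand : ((ix : Int) ∈ ((List.range n).filter (fun (i : Nat) => !PySem.Set.contains (PySem.Set.ofList keep_indices) (i : Int))).map (fun (i : Nat) => (i : Int)))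
          ↔ (ix < n ∧ PySem.Set.contains (PySem.Set.ofList keep_indices) (ix : Int) = false) := by
        simp only [List.mem_map, List.mem_filter, List.mem_range, Bool.not_eq_true']
        constructor
        · rintro ⟨i, ⟨hin, hp⟩, hcast⟩
          have : i = ix := by exact_mod_cast hcast
          subst this; exact ⟨hin, hp⟩
        · rintro ⟨hin, hp⟩; exact ⟨ix, ⟨hin, hp⟩, rfl⟩
      rw [hcand]
      constructor
      · rintro (h | ⟨i, _, hci, hcast⟩) ⟨⟨_, hk⟩, hall⟩
        · rw [← PySem.Set.contains_iff] at h
          rw [h] at hk; exact Bool.true_eq_false ▸ hk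
        · have : i = ix := by exact_mod_cast hcast.symm
          subst this
          rcases List.any_eq_true.mp hci with ⟨row, hrow, hne⟩
          rw [hall row hrow] at hne
          simp at hne
      · intro h
        by_cases hk : PySem.Set.contains (PySem.Set.ofList keep_indices) (ix : Int) = true
        · rw [PySem.Set.contains_iff] at hk
          exact Or.inl hk
        · by_cases hcix : c ix = true
          · exact Or.inr ⟨ix, List.mem_range.mpr hix, hcix, rfl⟩
          · exfalso
            apply h
            refine ⟨⟨hix, Bool.eq_false_iff.mpr hk⟩, ?_⟩
            intro row hrow
            have := List.any_eq_false.mp (Bool.eq_false_iff.mpr hcix) row hrow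
            simpa using this
    simp only [hkept]
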